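-- pv_equiv track=rewrite | github.com/acacar/aoc2024 | 8.py | generate_harmonic_antinodes
-- ===== SOURCE A (Python) =====
-- from itertools import combinations
--
-- def generate_harmonic_antinodes(positions: list[tuple[int, int]], width: int, height: int):
--     antinodes = []
--     for pos1, pos2 in combinations(positions, 2):
--         if pos1[0] != pos2[0] or pos1[1] != pos2[1]:
--             dx = pos2[0] - pos1[0]
--             dy = pos2[1] - pos1[1]
--             harmonic = 0
--             while True:
--                 antinode = (pos2[0] + harmonic * dx, pos2[1] + harmonic * dy)
--                 if 0 <= antinode[0] < width and 0 <= antinode[1] < height: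
--                     antinodes.append(antinode)
--                 else:
--                     break
--                 harmonic += 1
--             harmonic = 0
--             while True:
--                 antinode = (pos1[0] - harmonic * dx, pos1[1] - harmonic * dy)
--                 if 0 <= antinode[0] < width and 0 <= antinode[1] < height:
--                     antinodes.append(antinode)
--                 else:
--                     break
--                 harmonic += 1
--     return antinodes
-- ===== SOURCE B (Python) =====
-- from itertools import combinations
--
-- def _ray(x0, y0, dx, dy, width, height):
--     # closed-form length of the in-bounds prefix of the ray (x0,y0) + k*(dx,dy), k = 0,1,...
--     if not (0 <= x0 < width and 0 <= y0 < height):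
--         return []
--     kmax = None
--     if dx > 0:
--         kmax = (width - 1 - x0) // dx
--     elif dx < 0:
--         kmax = x0 // (-dx)
--     if dy > 0:
--         ky = (height - 1 - y0) // dy
--         kmax = ky if kmax is None else min(kmax, ky)
--     elif dy < 0:
--         ky = y0 // (-dy)
--         kmax = ky if kmax is None else min(kmax, ky)
--     return [(x0 + k * dx, y0 + k * dy) for k in range(kmax + 1)]
--
-- def generate_harmonic_antinodes(positions: list[tuple[int, int]], width: int, height: int):
--     antinodes = []
--     for pos1, pos2 in combinations(positions, 2):
--         if pos1 == pos2:
--             continue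
--         dx = pos2[0] - pos1[0]
--         dy = pos2[1] - pos1[1]
--         antinodes += _ray(pos2[0], pos2[1], dx, dy, width, height)
--         antinodes += _ray(pos1[0], pos1[1], -dx, -dy, width, height)
--     return antinodes
-- ===== Notes on version B (the rewrite author's own statement) =====
-- stated objective: alternative
-- what changed: Each ray's in-bounds prefix length is computed in closed form with floor division (per-axis bound intersection) and emitted via a range comprehension, instead of A's step-by-step while loops that test every point.
import Mathlib
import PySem

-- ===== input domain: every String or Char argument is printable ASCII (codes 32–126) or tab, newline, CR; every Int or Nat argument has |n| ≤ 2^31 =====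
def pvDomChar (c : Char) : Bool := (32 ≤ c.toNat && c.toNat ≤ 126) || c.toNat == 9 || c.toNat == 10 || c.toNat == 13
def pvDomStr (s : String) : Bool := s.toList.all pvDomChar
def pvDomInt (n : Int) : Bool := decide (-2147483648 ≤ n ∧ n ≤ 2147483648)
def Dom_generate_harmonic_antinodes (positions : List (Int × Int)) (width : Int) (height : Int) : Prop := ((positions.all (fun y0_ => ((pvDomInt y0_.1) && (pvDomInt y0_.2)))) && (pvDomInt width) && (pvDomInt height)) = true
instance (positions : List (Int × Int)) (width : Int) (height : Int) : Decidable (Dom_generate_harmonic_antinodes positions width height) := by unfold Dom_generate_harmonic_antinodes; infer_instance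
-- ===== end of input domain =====

-- B computes each ray's in-bounds prefix length in closed form (floor division) instead of A's step-by-step while loops; alternative decomposition, same asymptotic cost.


-- ===== PORT A =====
-- itertools.combinations(xs, 2) in order (shared pair enumeration helper)
def pvPairs (xs : List (Int × Int)) : List ((Int × Int) × (Int × Int)) :=
  match xs with
  | [] => []
  | x :: rest => rest.map (fun y => (x, y)) ++ pvPairs rest

-- fuel bound making A's while loops total; proved sufficient on every input (pvLoop*_emit)
def pvFuel (w h : Int) : Nat := w.toNat + h.toNat + 1

-- A's first while loop: antinode = pos2 + harmonic*d, append while in bounds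
def pvLoopPos (fuel : Nat) (bx by_ dx dy w h harmonic : Int) (acc : List (Int × Int)) : List (Int × Int) :=
  match fuel with
  | 0 => acc
  | f + 1 =>
    let ax := bx + harmonic * dx
    let ay := by_ + harmonic * dy
    if 0 ≤ ax ∧ ax < w ∧ 0 ≤ ay ∧ ay < h then
      pvLoopPos f bx by_ dx dy w h (harmonic + 1) (acc ++ [(ax, ay)])
    else acc

-- A's second while loop: antinode = pos1 - harmonic*d
def pvLoopNeg (fuel : Nat) (bx by_ dx dy w h harmonic : Int) (acc : List (Int × Int)) : List (Int × Int) :=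
  match fuel with
  | 0 => acc
  | f + 1 =>
    let ax := bx - harmonic * dx
    let ay := by_ - harmonic * dy
    if 0 ≤ ax ∧ ax < w ∧ 0 ≤ ay ∧ ay < h then
      pvLoopNeg f bx by_ dx dy w h (harmonic + 1) (acc ++ [(ax, ay)])
    else acc

def generate_harmonic_antinodes (positions : List (Int × Int)) (width : Int) (height : Int) : List (Int × Int) :=
  (pvPairs positions).foldl (fun acc pq =>
    if pq.1.1 ≠ pq.2.1 ∨ pq.1.2 ≠ pq.2.2 then
      let dx := pq.2.1 - pq.1.1
      let dy := pq.2.2 - pq.1.2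
      pvLoopNeg (pvFuel width height) pq.1.1 pq.1.2 dx dy width height 0
        (pvLoopPos (pvFuel width height) pq.2.1 pq.2.2 dx dy width height 0 acc)
    else acc) []

-- ===== PORT B =====
-- Source B's _ray: closed-form in-bounds prefix of the ray (x0,y0) + k*(dx,dy), k = 0,1,…
def pvRayAlt (x0 y0 dx dy w h : Int) : List (Int × Int) :=
  if 0 ≤ x0 ∧ x0 < w ∧ 0 ≤ y0 ∧ y0 < h then
    let kx : Option Int :=
      if 0 < dx then some (PySem.Int.floordiv (w - 1 - x0) dx)
      else if dx < 0 then some (PySem.Int.floordiv x0 (-dx))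
      else none
    let kmax : Option Int :=
      if 0 < dy then
        let ky := PySem.Int.floordiv (h - 1 - y0) dy
        some (match kx with | none => ky | some k => min k ky)
      else if dy < 0 then
        let ky := PySem.Int.floordiv y0 (-dy)
        some (match kx with | none => ky | some k => min k ky)
      else kx
    match kmax with
    | some k => (PySem.List.pyRange 0 (k + 1) 1).map (fun j => (x0 + j * dx, y0 + j * dy))
    | none => []   -- dx = dy = 0: never reached from the entry point (equal pairs are skipped)
  else []

def generate_harmonic_antinodes_alt (positions : List (Int × Int)) (width : Int) (height : Int) : List (Int × Int) :=
  (pvPairs positions).foldl (fun acc pq =>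
    if pq.1 = pq.2 then acc
    else
      let dx := pq.2.1 - pq.1.1
      let dy := pq.2.2 - pq.1.2
      acc ++ pvRayAlt pq.2.1 pq.2.2 dx dy width height
          ++ pvRayAlt pq.1.1 pq.1.2 (-dx) (-dy) width height) []

-- ===== PRECONDITION & SPEC =====
def Spec_generate_harmonic_antinodes (positions : List (Int × Int)) (width : Int) (height : Int) (out : List (Int × Int)) : Prop := out = generate_harmonic_antinodes_alt positions width height
instance (positions : List (Int × Int)) (width : Int) (height : Int) (out : List (Int × Int)) : Decidable (Spec_generate_harmonic_antinodes positions width height out) := by unfold Spec_generate_harmonic_antinodes; infer_instance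

-- ===== CLAIM (what is proved, stated in full; the proofs are below) =====
def Claim_equal_generate_harmonic_antinodes : Prop := ∀ (positions : List (Int × Int)) (width : Int) (height : Int), Dom_generate_harmonic_antinodes positions width height → Spec_generate_harmonic_antinodes positions width height (generate_harmonic_antinodes positions width height)

-- ===== LEMMAS AND PROOFS =====

-- the second loop is the first loop on the negated direction
theorem pvLoopNeg_eq_pos (fuel : Nat) : ∀ (bx by_ dx dy w h harmonic : Int) (acc : List (Int × Int)),
    pvLoopNeg fuel bx by_ dx dy w h harmonic acc = pvLoopPos fuel bx by_ (-dx) (-dy) w h harmonic acc := by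
  induction fuel with
  | zero => intro bx by_ dx dy w h k acc; rfl
  | succ f ih =>
    intro bx by_ dx dy w h k acc
    simp only [pvLoopNeg, pvLoopPos]
    have hx : bx - k * dx = bx + k * (-dx) := by ring
    have hy : by_ - k * dy = by_ + k * (-dy) := by ring
    rw [hx, hy]
    split_ifs with hcond
    · exact ih bx by_ dx dy w h (k + 1) (acc ++ [(bx + k * -dx, by_ + k * -dy)])
    · rfl

-- A's loop emits exactly the points at harmonics h0, h0+1, …, h0+n-1 when those are in bounds and h0+n is not
theorem pvLoop_emit (bx by_ dx dy w h : Int) :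
    ∀ (n fuel : Nat) (h0 : Int) (acc : List (Int × Int)), n < fuel →
    (∀ j : Nat, j < n → (0 ≤ bx + (h0 + j) * dx ∧ bx + (h0 + j) * dx < w ∧ 0 ≤ by_ + (h0 + j) * dy ∧ by_ + (h0 + j) * dy < h)) →
    ¬(0 ≤ bx + (h0 + n) * dx ∧ bx + (h0 + n) * dx < w ∧ 0 ≤ by_ + (h0 + n) * dy ∧ by_ + (h0 + n) * dy < h) →
    pvLoopPos fuel bx by_ dx dy w h h0 acc
      = acc ++ (List.range n).map (fun (j : Nat) => (bx + (h0 + (j : Int)) * dx, by_ + (h0 + (j : Int)) * dy)) := by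
  intro n
  induction n with
  | zero =>
    intro fuel h0 acc hfuel _ hstop
    obtain ⟨f, rfl⟩ : ∃ f, fuel = f + 1 := ⟨fuel - 1, by omega⟩
    simp only [pvLoopPos]
    rw [if_neg (by simpa using hstop)]
    simp
  | succ n ih =>
    intro fuel h0 acc hfuel hin hstop
    obtain ⟨f, rfl⟩ : ∃ f, fuel = f + 1 := ⟨fuel - 1, by omega⟩
    simp only [pvLoopPos]
    rw [if_pos (by simpa using hin 0 (by omega))]
    rw [ih f (h0 + 1) _ (by omega)
      (fun j hj => by
        have := hin (j + 1) (by omega)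
        push_cast at this ⊢
        convert this using 3 <;> ring_nf)
      (by
        intro hc
        apply hstop
        push_cast at hc ⊢
        convert hc using 3 <;> ring_nf)]
    rw [List.range_succ_eq_map, List.map_cons, List.map_map, List.append_assoc]
    congr 1
    rw [List.singleton_append]
    congr 1
    · norm_num
    · apply List.map_congr_left
      intro a _
      simp only [Function.comp_apply, Nat.succ_eq_add_one]
      push_cast
      rw [Prod.mk.injEq]
      constructor <;> ring

-- one constrained axis, positive step: the in-bounds upper constraint is a floor division
theorem pvAxis_pos {d x0 w j : Int} (hd : 0 < d) :
    (x0 + j * d < w) ↔ j ≤ PySem.Int.floordiv (w - 1 - x0) d := by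
  rw [PySem.Int.le_floordiv_iff_mul_le hd]
  have ht : ∀ t : Int, (x0 + t < w) ↔ t ≤ w - 1 - x0 := by intro t; omega
  exact ht (j * d)

-- one constrained axis, negative step: the in-bounds lower constraint is a floor division
theorem pvAxis_neg {d x0 j : Int} (hd : d < 0) :
    (0 ≤ x0 + j * d) ↔ j ≤ PySem.Int.floordiv x0 (-d) := by
  rw [PySem.Int.le_floordiv_iff_mul_le (by omega : (0:Int) < -d)]
  have h1 : j * -d = -(j * d) := by ring
  rw [h1]
  omega

-- a nonnegative value floor-divided by a positive value does not grow
theorem pvFloordiv_le_self {a d : Int} (hd : 0 < d) (ha : 0 ≤ a) :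
    PySem.Int.floordiv a d ≤ a := by
  have := (PySem.Int.floordiv_lt_iff_lt_mul (a := a) (b := d) (q := a + 1) hd).mpr
    (by nlinarith)
  omega

-- closed-form finish: given the exact characterisation 'in bounds ↔ j ≤ k', A's loop equals B's range
theorem pvFinish (bx by_ dx dy w h k : Int) (acc : List (Int × Int))
    (hk0 : 0 ≤ k) (hkb : k < (w.toNat : Int) + (h.toNat : Int))
    (hiff : ∀ j : Int, 0 ≤ j →
      ((0 ≤ bx + j * dx ∧ bx + j * dx < w ∧ 0 ≤ by_ + j * dy ∧ by_ + j * dy < h) ↔ j ≤ k)) :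
    pvLoopPos (pvFuel w h) bx by_ dx dy w h 0 acc
      = acc ++ (PySem.List.pyRange 0 (k + 1) 1).map (fun j => (bx + j * dx, by_ + j * dy)) := by
  rw [pvLoop_emit bx by_ dx dy w h (k + 1).toNat (pvFuel w h) 0 acc
    (by unfold pvFuel; omega)
    (fun j hj => by
      have hj' : (j : Int) ≤ k := by omega
      have := (hiff j (by positivity)).mpr hj'
      simpa using this)
    (by
      intro hc
      have hn : (((k + 1).toNat : Int)) = k + 1 := by omega
      rw [zero_add, hn] at hc
      have := (hiff (k + 1) (by omega)).mp hc
      omega)]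
  congr 1
  rw [PySem.List.pyRange_one]
  simp only [Int.sub_zero, List.map_map]
  apply List.map_congr_left
  intro a _
  simp

-- per-pair core: for a non-degenerate direction, A's loop appends exactly B's ray
theorem pvRay_eq (bx by_ dx dy w h : Int) (hne : ¬(dx = 0 ∧ dy = 0)) (acc : List (Int × Int)) :
    pvLoopPos (pvFuel w h) bx by_ dx dy w h 0 acc = acc ++ pvRayAlt bx by_ dx dy w h := by
  by_cases hin : 0 ≤ bx ∧ bx < w ∧ 0 ≤ by_ ∧ by_ < h
  · obtain ⟨hbx0, hbxw, hby0, hbyh⟩ := hin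
    unfold pvRayAlt
    rw [if_pos ⟨hbx0, hbxw, hby0, hbyh⟩]
    rcases lt_trichotomy dx 0 with hdx | hdx | hdx <;>
      rcases lt_trichotomy dy 0 with hdy | hdy | hdy
    -- dx < 0, dy < 0
    · simp only [if_neg (by omega : ¬ 0 < dx), if_pos hdx, if_neg (by omega : ¬ 0 < dy), if_pos hdy]
      have hax := (pvAxis_neg (x0 := bx) (j := 0) hdx
       ); have hay := (pvAxis_neg (x0 := by_) (j := 0) hdy)
      simp only [zero_mul, add_zero] at hax hay
      have hx1 := pvFloordiv_le_self (by omega : (0:Int) < -dx) hbx0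
      apply pvFinish
      · omega
      · omega
      · intro j hj
        have hm1 : j * dx ≤ 0 := by nlinarith
        have hm2 : j * dy ≤ 0 := by nlinarith
        rw [pvAxis_neg hdx, pvAxis_neg hdy]
        constructor
        · rintro ⟨h1, _, h2, _⟩; omega
        · intro h1; exact ⟨by omega, by omega, by omega, by omega⟩
    -- dx < 0, dy = 0
    · subst hdy
      simp only [if_neg (by omega : ¬ 0 < dx), if_pos hdx, lt_irrefl, reduceIte]
      have hax := (pvAxis_neg (x0 := bx) (j := 0) hdx)
      simp only [zero_mul, add_zero] at hax
      have hx1 := pvFloordiv_le_self (by omega : (0:Int) < -dx) hbx0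
      apply pvFinish
      · omega
      · omega
      · intro j hj
        have hm1 : j * dx ≤ 0 := by nlinarith
        rw [pvAxis_neg hdx]
        constructor
        · rintro ⟨h1, _, _, _⟩; omega
        · intro h1; exact ⟨by omega, by omega, by simpa using hby0, by simpa⟩
    -- dx < 0, dy > 0
    · simp only [if_neg (by omega : ¬ 0 < dx), if_pos hdx, if_pos hdy]
      have hax := (pvAxis_neg (x0 := bx) (j := 0) hdx)
      have hay := (pvAxis_pos (x0 := by_) (w := h) (j := 0) hdy)
      simp only [zero_mul, add_zero] at hax hay
      have hx1 := pvFloordiv_le_self (by omega : (0:Int) < -dx) hbx0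
      apply pvFinish
      · omega
      · omega
      · intro j hj
        have hm1 : j * dx ≤ 0 := by nlinarith
        have hm2 : 0 ≤ j * dy := by positivity
        rw [pvAxis_neg hdx, pvAxis_pos hdy]
        constructor
        · rintro ⟨h1, _, _, h2⟩; omega
        · intro h1; exact ⟨by omega, by omega, by omega, by omega⟩
    -- dx = 0, dy < 0
    · subst hdx
      simp only [lt_irrefl, reduceIte, if_neg (by omega : ¬ 0 < dy), if_pos hdy]
      have hay := (pvAxis_neg (x0 := by_) (j := 0) hdy)
      simp only [zero_mul, add_zero] at hay
      have hy1 := pvFloordiv_le_self (by omega : (0:Int) < -dy) hby0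
      apply pvFinish
      · omega
      · omega
      · intro j hj
        have hm2 : j * dy ≤ 0 := by nlinarith
        rw [pvAxis_neg hdy]
        constructor
        · rintro ⟨_, _, h2, _⟩; omega
        · intro h1; exact ⟨by simpa using hbx0, by simpa, by omega, by omega⟩
    -- dx = 0, dy = 0: excluded
    · exact absurd ⟨hdx, hdy⟩ hne
    -- dx = 0, dy > 0
    · subst hdx
      simp only [lt_irrefl, reduceIte, if_pos hdy]
      have hay := (pvAxis_pos (x0 := by_) (w := h) (j := 0) hdy)
      simp only [zero_mul, add_zero] at hay
      have hy1 := pvFloordiv_le_self hdy (by omega : (0:Int) ≤ h - 1 - by_)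
      apply pvFinish
      · omega
      · omega
      · intro j hj
        have hm2 : 0 ≤ j * dy := by positivity
        rw [pvAxis_pos hdy]
        constructor
        · rintro ⟨_, _, _, h2⟩; omega
        · intro h1; exact ⟨by simpa using hbx0, by simpa, by omega, by omega⟩
    -- dx > 0, dy < 0
    · simp only [if_pos hdx, if_neg (by omega : ¬ 0 < dy), if_pos hdy]
      have hax := (pvAxis_pos (x0 := bx) (w := w) (j := 0) hdx)
      have hay := (pvAxis_neg (x0 := by_) (j := 0) hdy)
      simp only [zero_mul, add_zero] at hax hay
      have hx1 := pvFloordiv_le_self hdx (by omega : (0:Int) ≤ w - 1 - bx)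
      apply pvFinish
      · omega
      · omega
      · intro j hj
        have hm1 : 0 ≤ j * dx := by positivity
        have hm2 : j * dy ≤ 0 := by nlinarith
        rw [pvAxis_pos hdx, pvAxis_neg hdy]
        constructor
        · rintro ⟨_, h1, h2, _⟩; omega
        · intro h1; exact ⟨by omega, by omega, by omega, by omega⟩
    -- dx > 0, dy = 0
    · subst hdy
      simp only [if_pos hdx, lt_irrefl, reduceIte]
      have hax := (pvAxis_pos (x0 := bx) (w := w) (j := 0) hdx)
      simp only [zero_mul, add_zero] at hax
      have hx1 := pvFloordiv_le_self hdx (by omega : (0:Int) ≤ w - 1 - bx)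
      apply pvFinish
      · omega
      · omega
      · intro j hj
        have hm1 : 0 ≤ j * dx := by positivity
        rw [pvAxis_pos hdx]
        constructor
        · rintro ⟨_, h1, _, _⟩; omega
        · intro h1; exact ⟨by omega, by omega, by simpa using hby0, by simpa⟩
    -- dx > 0, dy > 0
    · simp only [if_pos hdx, if_pos hdy]
      have hax := (pvAxis_pos (x0 := bx) (w := w) (j := 0) hdx)
      have hay := (pvAxis_pos (x0 := by_) (w := h) (j := 0) hdy)
      simp only [zero_mul, add_zero] at hax hay
      have hx1 := pvFloordiv_le_self hdx (by omega : (0:Int) ≤ w - 1 - bx)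
      apply pvFinish
      · omega
      · omega
      · intro j hj
        have hm1 : 0 ≤ j * dx := by positivity
        have hm2 : 0 ≤ j * dy := by positivity
        rw [pvAxis_pos hdx, pvAxis_pos hdy]
        constructor
        · rintro ⟨_, h1, _, h2⟩; omega
        · intro h1; exact ⟨by omega, by omega, by omega, by omega⟩
  · rw [pvLoop_emit bx by_ dx dy w h 0 (pvFuel w h) 0 acc (by unfold pvFuel; omega)
      (by omega) (by simpa using hin)]
    unfold pvRayAlt
    rw [if_neg hin]
    simp

-- the two folds agree for every pair list and accumulator
theorem pvFold_eq (w h : Int) : ∀ (ps : List ((Int × Int) × (Int × Int))) (acc : List (Int × Int)),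
    ps.foldl (fun acc pq =>
      if pq.1.1 ≠ pq.2.1 ∨ pq.1.2 ≠ pq.2.2 then
        pvLoopNeg (pvFuel w h) pq.1.1 pq.1.2 (pq.2.1 - pq.1.1) (pq.2.2 - pq.1.2) w h 0
          (pvLoopPos (pvFuel w h) pq.2.1 pq.2.2 (pq.2.1 - pq.1.1) (pq.2.2 - pq.1.2) w h 0 acc)
      else acc) acc
    = ps.foldl (fun acc pq =>
      if pq.1 = pq.2 then acc
      else acc ++ pvRayAlt pq.2.1 pq.2.2 (pq.2.1 - pq.1.1) (pq.2.2 - pq.1.2) w h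
               ++ pvRayAlt pq.1.1 pq.1.2 (-(pq.2.1 - pq.1.1)) (-(pq.2.2 - pq.1.2)) w h) acc := by
  intro ps
  induction ps with
  | nil => intro acc; rfl
  | cons pq rest ih =>
    intro acc
    simp only [List.foldl_cons]
    rw [ih]
    congr 1
    by_cases heq : pq.1 = pq.2
    · rw [if_pos heq, if_neg (by rw [heq]; simp)]
    · have hne : pq.1.1 ≠ pq.2.1 ∨ pq.1.2 ≠ pq.2.2 := by
        by_contra hc
        push Not at hc
        exact heq (Prod.ext hc.1 hc.2)
      rw [if_pos hne, if_neg heq]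
      have hd : ¬((pq.2.1 - pq.1.1) = 0 ∧ (pq.2.2 - pq.1.2) = 0) := by
        intro hc
        rcases hne with hne | hne <;> omega
      rw [pvLoopNeg_eq_pos, pvRay_eq _ _ _ _ _ _ hd,
          pvRay_eq _ _ _ _ _ _ (by intro hc; exact hd (by omega)),
          List.append_assoc]

-- ===== VERDICT (by name: the statement is the Claim_ definition above) =====
theorem generate_harmonic_antinodes_spec : Claim_equal_generate_harmonic_antinodes := by
  intro positions width height _
  show _ = _
  unfold generate_harmonic_antinodes generate_harmonic_antinodes_alt
  exact pvFold_eq width height (pvPairs positions) []
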